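-- pv_equiv track=rewrite | github.com/vijaympgs/Olivine-erp-hrm | core/auth_access/backend/user_management/toolbar_views.py | parse_toolbar_string
-- ===== SOURCE A (Python) =====
-- def parse_toolbar_string(config_string):
--     """
--     Parse new character-based toolbar config string (e.g. "NESC")
--     into full permission dictionary.
--     """
--     # Initialize all to False
--     all_keys = [
--         'new', 'edit', 'save', 'cancel', 'clear', 'authorize', 'submit', 'reject',
--         'amend', 'view', 'print', 'email', 'refresh', 'delete', 'hold', 'void',
--         'exit', 'upload', 'download', 'clone', 'first', 'prev', 'next', 'last',
--         'search', 'filter', 'notes', 'attach', 'settings', 'help'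
--     ]
--     perms = {k: False for k in all_keys}
--
--     if not config_string:
--         return perms
--
--     # Character Map (Must match Seed/Frontend)
--     # N:New, E:Edit, S:Save, C:Cancel, K:Clear
--     # Z:Authorize, T:Submit, J:Reject, A:Amend
--     # V:View, P:Print, M:Email
--     # R:Refresh, D:Delete, H:Hold, O:Void
--     # X:Exit
--     # I:Import/Upload, Y:Export/Download, L:Clone
--     # 1:First, 2:Prev, 3:Next, 4:Last
--     # Q:Search, F:Filter
--     # B:Notes, G:Attach, W:Settings, ?:Help
--
--     mapping = {
--         'N': 'new', 'E': 'edit', 'S': 'save', 'C': 'cancel', 'K': 'clear',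
--         'Z': 'authorize', 'T': 'submit', 'J': 'reject', 'A': 'amend',
--         'V': 'view', 'P': 'print', 'M': 'email',
--         'R': 'refresh', 'D': 'delete', 'H': 'hold', 'O': 'void',
--         'X': 'exit', 'I': 'upload', 'Y': 'download', 'L': 'clone',
--         '1': 'first', '2': 'prev', '3': 'next', '4': 'last',
--         'Q': 'search', 'F': 'filter',
--         'B': 'notes', 'G': 'attach', 'W': 'settings', '?': 'help'
--     }
--
--     for char in config_string:
--         key = mapping.get(char)
--         if key:
--             perms[key] = True
--
--     return perms
-- ===== SOURCE B (Python) =====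
-- def parse_toolbar_string(config_string):
--     """
--     Parse new character-based toolbar config string (e.g. "NESC")
--     into full permission dictionary.
--     """
--     # Inverted index: instead of scanning the config string through a
--     # char->key mapping, iterate over the fixed (key, char) table and test
--     # whether each key's character occurs in the config string.
--     key_chars = [
--         ('new', 'N'), ('edit', 'E'), ('save', 'S'), ('cancel', 'C'),
--         ('clear', 'K'), ('authorize', 'Z'), ('submit', 'T'), ('reject', 'J'),
--         ('amend', 'A'), ('view', 'V'), ('print', 'P'), ('email', 'M'),
--         ('refresh', 'R'), ('delete', 'D'), ('hold', 'H'), ('void', 'O'),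
--         ('exit', 'X'), ('upload', 'I'), ('download', 'Y'), ('clone', 'L'),
--         ('first', '1'), ('prev', '2'), ('next', '3'), ('last', '4'),
--         ('search', 'Q'), ('filter', 'F'), ('notes', 'B'), ('attach', 'G'),
--         ('settings', 'W'), ('help', '?'),
--     ]
--     s = config_string or ''
--     return {k: c in s for k, c in key_chars}
-- ===== Notes on version B (the rewrite author's own statement) =====
-- stated objective: simpler
-- what changed: B inverts the traversal: instead of prefilling a False-dict and mutating it while mapping each config character through a char->key dict, B walks the fixed (key, char) table once and sets each key to whether its character occurs in the config string.
import Mathlib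
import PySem

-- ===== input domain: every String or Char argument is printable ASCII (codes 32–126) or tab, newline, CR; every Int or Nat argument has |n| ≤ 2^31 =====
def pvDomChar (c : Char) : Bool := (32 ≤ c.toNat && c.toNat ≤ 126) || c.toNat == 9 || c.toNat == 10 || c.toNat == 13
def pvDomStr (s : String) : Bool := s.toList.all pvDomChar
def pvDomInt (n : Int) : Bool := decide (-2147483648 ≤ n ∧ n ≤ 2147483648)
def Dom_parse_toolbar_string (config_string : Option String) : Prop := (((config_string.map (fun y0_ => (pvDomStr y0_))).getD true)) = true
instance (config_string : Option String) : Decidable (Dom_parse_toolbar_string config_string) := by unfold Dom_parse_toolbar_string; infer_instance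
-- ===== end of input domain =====

-- B inverts the traversal: A prefills a False-dict and mutates it while mapping each config
-- character through a char->key dict; B walks a fixed (key, char) table and tests whether each
-- key's character occurs in the config string (simpler decomposition, same observable result).

-- ===== PORT A =====
def pvAKeys : List String :=
  ["new", "edit", "save", "cancel", "clear", "authorize", "submit", "reject",
   "amend", "view", "print", "email", "refresh", "delete", "hold", "void",
   "exit", "upload", "download", "clone", "first", "prev", "next", "last",
   "search", "filter", "notes", "attach", "settings", "help"]

def pvAMap : PySem.Dict Char String :=
  PySem.Dict.ofList
    [('N', "new"), ('E', "edit"), ('S', "save"), ('C', "cancel"), ('K', "clear"),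
     ('Z', "authorize"), ('T', "submit"), ('J', "reject"), ('A', "amend"),
     ('V', "view"), ('P', "print"), ('M', "email"),
     ('R', "refresh"), ('D', "delete"), ('H', "hold"), ('O', "void"),
     ('X', "exit"), ('I', "upload"), ('Y', "download"), ('L', "clone"),
     ('1', "first"), ('2', "prev"), ('3', "next"), ('4', "last"),
     ('Q', "search"), ('F', "filter"),
     ('B', "notes"), ('G', "attach"), ('W', "settings"), ('?', "help")]

-- `{k: False for k in all_keys}` over distinct literal keys is Dict.ofList of the pairs in order;
-- `if not config_string` is true exactly for None and "".
def parse_toolbar_string (config_string : Option String) : List (String × Bool) :=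
  let perms : PySem.Dict String Bool := PySem.Dict.ofList (pvAKeys.map (fun k => (k, false)))
  match config_string with
  | none => perms.items
  | some s =>
    if s.toList = [] then perms.items
    else
      (s.toList.foldl (fun d c =>
        match pvAMap.get? c with
        | some key => d.insert key true
        | none => d) perms).items

-- ===== PORT B =====
-- the fixed (key, char) table, in all_keys order
def pvBPairs : List (String × Char) :=
  [("new", 'N'), ("edit", 'E'), ("save", 'S'), ("cancel", 'C'),
   ("clear", 'K'), ("authorize", 'Z'), ("submit", 'T'), ("reject", 'J'),
   ("amend", 'A'), ("view", 'V'), ("print", 'P'), ("email", 'M'),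
   ("refresh", 'R'), ("delete", 'D'), ("hold", 'H'), ("void", 'O'),
   ("exit", 'X'), ("upload", 'I'), ("download", 'Y'), ("clone", 'L'),
   ("first", '1'), ("prev", '2'), ("next", '3'), ("last", '4'),
   ("search", 'Q'), ("filter", 'F'), ("notes", 'B'), ("attach", 'G'),
   ("settings", 'W'), ("help", '?')]

-- `config_string or ''` on Option String is `getD ""`; Python's `c in s` for a one-character
-- needle is exactly character membership, ported as list contains; the dict comprehension over
-- distinct literal keys is the pairs list in order.
def parse_toolbar_string_alt (config_string : Option String) : List (String × Bool) :=
  let s := (config_string.getD "").toList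
  pvBPairs.map (fun p => (p.1, s.contains p.2))

-- ===== PRECONDITION & SPEC =====
def Spec_parse_toolbar_string (config_string : Option String) (out : List (String × Bool)) : Prop := out = parse_toolbar_string_alt config_string
instance (config_string : Option String) (out : List (String × Bool)) : Decidable (Spec_parse_toolbar_string config_string out) := by unfold Spec_parse_toolbar_string; infer_instance

-- ===== CLAIM (what is proved, stated in full; the proofs are below) =====
def Claim_equal_parse_toolbar_string : Prop := ∀ (config_string : Option String), Dom_parse_toolbar_string config_string → Spec_parse_toolbar_string config_string (parse_toolbar_string config_string)

-- ===== LEMMAS AND PROOFS =====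

-- "some char of cs maps to key k"
def pvHit (cs : List Char) (k : String) : Bool := cs.any (fun c => pvAMap.get? c == some k)

theorem pvVal_mem_keys {c : Char} {key : String} (h : pvAMap.get? c = some key) :
    key ∈ pvAKeys := by
  have h2 := PySem.Dict.mem_items_of_get?_eq_some pvAMap h
  have h3 : ∀ p ∈ pvAMap.items, p.2 ∈ pvAKeys := by decide
  exact h3 _ h2

theorem pvInsert_map_eq (f : String → Bool) (key : String) (hk : key ∈ pvAKeys) :
    (PySem.Dict.mk (pvAKeys.map (fun k => (k, f k)))).insert key true
      = PySem.Dict.mk (pvAKeys.map (fun k => (k, f k || (key == k)))) := by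
  have hc : (PySem.Dict.mk (pvAKeys.map (fun k => (k, f k)))).contains key = true := by
    rw [PySem.Dict.contains_eq_decide_mem_keys]
    simp only [PySem.Dict.keys_mk, List.map_map]
    simp [hk]
  apply PySem.Dict.ext
  rw [PySem.Dict.items_insert_of_contains _ _ hc]
  show (pvAKeys.map (fun k => (k, f k))).map _ = _
  rw [List.map_map]
  dsimp only
  refine List.map_congr_left (fun k _ => ?_)
  by_cases h : k = key
  · subst h; simp
  · simp [h, Ne.symm h]

theorem pvA_fold (cs : List Char) (f : String → Bool) :
    cs.foldl (fun d c =>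
        match pvAMap.get? c with
        | some key => d.insert key true
        | none => d) (PySem.Dict.mk (pvAKeys.map (fun k => (k, f k))))
      = PySem.Dict.mk (pvAKeys.map (fun k => (k, f k || pvHit cs k))) := by
  induction cs generalizing f with
  | nil => simp [pvHit]
  | cons c cs ih =>
    rw [List.foldl_cons]
    cases h : pvAMap.get? c with
    | none =>
      dsimp only
      rw [ih f]
      congr 1
      refine List.map_congr_left (fun k _ => ?_)
      simp [pvHit, h]
    | some key =>
      dsimp only
      rw [pvInsert_map_eq f key (pvVal_mem_keys h), ih]
      congr 1
      refine List.map_congr_left (fun k _ => ?_)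
      have hb : (pvAMap.get? c == some k) = (key == k) := by rw [h]; rfl
      simp [pvHit, hb, Bool.or_assoc]

-- the mapping is a bijection between the table's chars and keys: get? x = some k ↔ x = the char of k
theorem pv_get_iff (x : Char) {k : String} {c : Char} (h : (k, c) ∈ pvBPairs) :
    pvAMap.get? x = some k ↔ x = c := by
  constructor
  · intro hx
    have hm := PySem.Dict.mem_items_of_get?_eq_some pvAMap hx
    have hinj : ∀ p ∈ pvAMap.items, ∀ q ∈ pvBPairs, p.2 = q.1 → p.1 = q.2 := by decide
    exact hinj _ hm _ h rfl
  · intro hx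
    subst hx
    have hall : ∀ q ∈ pvBPairs, pvAMap.get? q.2 = some q.1 := by decide
    exact hall _ h

theorem pvHit_eq_contains (cs : List Char) {k : String} {c : Char} (h : (k, c) ∈ pvBPairs) :
    pvHit cs k = cs.contains c := by
  unfold pvHit
  rw [List.contains_eq_any_beq]
  refine PySem.List.any_congr_mem (fun x _ => ?_)
  have := pv_get_iff x h
  by_cases hx : x = c
  · subst hx; simp [this.mpr rfl]
  · have hne : pvAMap.get? x ≠ some k := fun hc => hx (this.mp hc)
    simp [hne, Ne.symm hx]

-- ===== VERDICT (by name: the statement is the Claim_ definition above) =====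
theorem parse_toolbar_string_spec : Claim_equal_parse_toolbar_string := by
  intro cfg _
  show parse_toolbar_string cfg = parse_toolbar_string_alt cfg
  cases cfg with
  | none => decide
  | some s =>
    unfold parse_toolbar_string parse_toolbar_string_alt
    dsimp only [Option.getD]
    by_cases hs : s.toList = []
    · rw [if_pos hs]
      rw [hs]
      decide
    · rw [if_neg hs]
      have h0 : (PySem.Dict.ofList (pvAKeys.map (fun k => (k, false))) : PySem.Dict String Bool)
          = PySem.Dict.mk (pvAKeys.map (fun k => (k, false))) := by decide
      rw [h0, pvA_fold s.toList (fun _ => false)]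
      show pvAKeys.map (fun k => (k, false || pvHit s.toList k)) = _
      have hkeys : pvAKeys = pvBPairs.map Prod.fst := by decide
      rw [hkeys, List.map_map]
      refine List.map_congr_left (fun p hp => ?_)
      dsimp only [Function.comp]
      rw [pvHit_eq_contains s.toList (k := p.1) (c := p.2) hp]
      simp
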